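-- pv_equiv track=rewrite | github.com/shareeep/ubs-cc | routes/digital_colony.py | compute_weight
-- ===== SOURCE A (Python) =====
-- def compute_weight(colony: str, generations: int) -> str:
--     # Convert colony string to list of integers
--     digits = [int(c) for c in colony]
--
--     # Initialize pair counts: index = 10*a + b
--     pair_counts = [0] * 100
--     for i in range(len(digits) - 1):
--         a, b = digits[i], digits[i + 1]
--         pair_counts[10 * a + b] += 1
--
--     # Initialize current weight
--     current_weight = sum(digits)
--
--     for gen in range(generations):
--         W = current_weight % 10
--         new_pair_counts = [0] * 100
--         sum_new_digits = 0
--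
--         for a in range(10):
--             for b in range(10):
--                 count = pair_counts[10 * a + b]
--                 if count == 0:
--                     continue
--
--                 # Calculate signature
--                 if a > b:
--                     s = a - b
--                 elif a < b:
--                     s = 10 - (b - a)
--                 else:
--                     s = 0
--
--                 # Calculate new digit
--                 d = (W + s) % 10
--                 sum_new_digits += count * d
--
--                 # Update new pair counts
--                 new_pair_counts[10 * a + d] += count
--                 new_pair_counts[10 * d + b] += count
--
--         # Update current weight
--         current_weight += sum_new_digits
--         pair_counts = new_pair_counts
--
--
--     return str(current_weight)
-- ===== SOURCE B (Python) =====
-- def compute_weight(colony: str, generations: int) -> str: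
--     # No pair-count simulation: first precompute the weight residue w_t of each
--     # generation by a scalar recurrence (the inserted digits (w + a - b) % 10
--     # telescope mod 10 to m*w + first - last, with the pair count m doubling
--     # each generation), then run a backward dynamic program giving, per pair
--     # (a, b), the total weight its descendants add over the remaining
--     # generations; finally charge each original adjacent pair once.
--     digits = [int(c) for c in colony]
--     total = sum(digits)
--
--     ws = []
--     w = total % 10
--     m = (len(digits) - 1) % 10 if len(digits) >= 2 else 0
--     f = digits[0] - digits[-1] if len(digits) >= 2 else 0
--     for _ in range(generations):
--         ws.append(w)
--         w = (w + m * w + f) % 10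
--         m = 2 * m % 10
--
--     contrib = [0] * 100
--     for w in reversed(ws):
--         nxt = contrib
--         contrib = [0] * 100
--         for a in range(10):
--             for b in range(10):
--                 d = (w + a - b) % 10
--                 contrib[10 * a + b] = d + nxt[10 * a + d] + nxt[10 * d + b]
--
--     return str(total + sum(contrib[10 * a + b] for a, b in zip(digits, digits[1:])))
-- ===== Notes on version B (the rewrite author's own statement) =====
-- stated objective: alternative
-- what changed: A simulates the colony forward as a 100-slot adjacent-pair count histogram updated by a guarded 10x10 scatter each generation; B never counts pairs: it first derives each generation's weight residue from a closed scalar recurrence (the inserted digits (w+a-b)%10 telescope mod 10 to m*w + first-last, with the pair count m doubling), then runs a backward dynamic program giving each pair (a,b) the total weight its descendants ever add, and charges each original adjacent pair once.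
import Mathlib
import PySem

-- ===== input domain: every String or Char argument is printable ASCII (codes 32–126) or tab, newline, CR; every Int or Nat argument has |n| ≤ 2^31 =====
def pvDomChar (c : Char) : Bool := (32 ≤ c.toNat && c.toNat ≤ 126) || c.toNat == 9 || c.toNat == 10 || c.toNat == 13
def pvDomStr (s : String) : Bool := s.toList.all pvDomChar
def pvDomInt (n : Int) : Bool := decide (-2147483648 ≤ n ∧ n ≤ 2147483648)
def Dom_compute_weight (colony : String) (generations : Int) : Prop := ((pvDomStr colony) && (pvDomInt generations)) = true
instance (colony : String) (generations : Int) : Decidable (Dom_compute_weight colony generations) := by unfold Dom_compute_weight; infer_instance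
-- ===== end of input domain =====

set_option maxRecDepth 8000


-- B replaces A's forward pair-count simulation by a scalar residue recurrence
-- (the inserted digits telescope mod 10) plus a backward per-pair contribution DP;
-- same cost, no multiset state (objective: alternative).

-- ===== PORT A =====
-- digits = [int(c) for c in colony]   (shared helper: both Pythons start with this same line)
def pvDigits (colony : String) : List Int :=
  colony.toList.map (fun c => (PySem.Int.ofStr? (String.ofList [c])).getD 0)

-- l[i] += v   (the statement A uses; the index is ≥ 0 and in range here)
def pvAddAt (l : List Int) (i : Int) (v : Int) : List Int :=
  PySem.List.pySetD l i (PySem.List.pyGetD l i 0 + v)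

-- the body of A's 'for gen in range(generations)' loop, verbatim
def pvStepA (st : Int × List Int) (_gen : Int) : Int × List Int :=
  let W := PySem.Int.mod st.1 10
  let inner := (PySem.List.pyRange 0 10 1).foldl
    (fun (st2 : List Int × Int) a =>
      (PySem.List.pyRange 0 10 1).foldl
        (fun (st2 : List Int × Int) b =>
          let count := PySem.List.pyGetD st.2 (10 * a + b) 0
          if count = 0 then st2
          else
            let s : Int := if a > b then a - b else if a < b then 10 - (b - a) else 0
            let d := PySem.Int.mod (W + s) 10
            (pvAddAt (pvAddAt st2.1 (10 * a + d) count) (10 * d + b) count,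
             st2.2 + count * d)) st2) (List.replicate 100 (0 : Int), 0)
  (st.1 + inner.2, inner.1)

def compute_weight (colony : String) (generations : Int) : String :=
  let digits := pvDigits colony
  let pair_counts := (PySem.List.pyRange 0 ((digits.length : Int) - 1) 1).foldl
    (fun pc i =>
      pvAddAt pc (10 * PySem.List.pyGetD digits i 0 + PySem.List.pyGetD digits (i + 1) 0) 1)
    (List.replicate 100 (0 : Int))
  let fin := (PySem.List.pyRange 0 generations 1).foldl pvStepA (digits.sum, pair_counts)
  PySem.Int.toStr fin.1

-- ===== PORT B =====
def compute_weight_alt (colony : String) (generations : Int) : String :=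
  let digits := pvDigits colony
  let total := digits.sum
  -- w = total % 10; m, f of the scalar residue recurrence
  let m0 : Int := if 2 ≤ digits.length then PySem.Int.mod ((digits.length : Int) - 1) 10 else 0
  let f : Int := if 2 ≤ digits.length
    then PySem.List.pyGetD digits 0 0 - PySem.List.pyGetD digits (-1) 0 else 0
  -- for _ in range(generations): ws.append(w); w = (w + m*w + f) % 10; m = 2*m % 10
  let res := (PySem.List.pyRange 0 generations 1).foldl
    (fun (st : List Int × Int × Int) _ =>
      (st.1 ++ [st.2.1],
       PySem.Int.mod (st.2.1 + st.2.2 * st.2.1 + f) 10,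
       PySem.Int.mod (2 * st.2.2) 10))
    ([], PySem.Int.mod total 10, m0)
  -- for w in reversed(ws): rebuild the 100-entry contribution table
  let contrib := res.1.reverse.foldl
    (fun (contrib : List Int) w =>
      (PySem.List.pyRange 0 10 1).foldl
        (fun (c : List Int) a =>
          (PySem.List.pyRange 0 10 1).foldl
            (fun (c : List Int) b =>
              let d := PySem.Int.mod (w + a - b) 10
              PySem.List.pySetD c (10 * a + b)
                (d + PySem.List.pyGetD contrib (10 * a + d) 0
                   + PySem.List.pyGetD contrib (10 * d + b) 0)) c)
        (List.replicate 100 (0 : Int)))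
    (List.replicate 100 (0 : Int))
  PySem.Int.toStr (total + ((digits.zip digits.tail).map
    (fun ab => PySem.List.pyGetD contrib (10 * ab.1 + ab.2) 0)).sum)

-- ===== PRECONDITION & SPEC =====
-- Pre_ excludes exactly the colonies containing a non-digit character, on which A's int(c) raises ValueError.
def Pre_compute_weight (colony : String) (generations : Int) : Prop :=
  (colony.toList.all (fun c => '0' ≤ c && c ≤ '9')) = true
instance (colony : String) (generations : Int) : Decidable (Pre_compute_weight colony generations) := by
  unfold Pre_compute_weight; infer_instance
def pvWitness_compute_weight : String × Int := ("91759", 3)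

def Spec_compute_weight (colony : String) (generations : Int) (out : String) : Prop := out = compute_weight_alt colony generations
instance (colony : String) (generations : Int) (out : String) : Decidable (Spec_compute_weight colony generations out) := by unfold Spec_compute_weight; infer_instance

-- ===== CLAIM (what is proved, stated in full; the proofs are below) =====
def Claim_equal_compute_weight : Prop := ∀ (colony : String) (generations : Int), Dom_compute_weight colony generations → Pre_compute_weight colony generations → Spec_compute_weight colony generations (compute_weight colony generations)

-- ===== LEMMAS AND PROOFS =====

-- proof-side abbreviations
def pvGrid : List (Int × Int) :=
  (PySem.List.pyRange 0 10 1).flatMap (fun a => (PySem.List.pyRange 0 10 1).map (Prod.mk a))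

def pvS (a b : Int) : Int := if a > b then a - b else if a < b then 10 - (b - a) else 0
def pvD (w a b : Int) : Int := PySem.Int.mod (w + pvS a b) 10
def pvCnt (pc : List Int) (p : Int × Int) : Int := PySem.List.pyGetD pc (10 * p.1 + p.2) 0
def pvI1 (w : Int) (p : Int × Int) : Int := 10 * p.1 + pvD w p.1 p.2
def pvI2 (w : Int) (p : Int × Int) : Int := 10 * pvD w p.1 p.2 + p.2
-- the pair histogram of a pair list (exactly A's initial scatter loop)
def pvHist (P : List (Int × Int)) : List Int :=
  P.foldl (fun pc ab => pvAddAt pc (10 * ab.1 + ab.2) 1) (List.replicate 100 (0 : Int))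
-- the two child pairs a pair spawns
def pvChild (w : Int) (ab : Int × Int) : List (Int × Int) :=
  [(ab.1, pvD w ab.1 ab.2), (pvD w ab.1 ab.2, ab.2)]
-- the interleaved next-generation digit list
def pvInter (w : Int) : List Int → List Int
  | [] => []
  | [a] => [a]
  | a :: b :: t => a :: pvD w a b :: pvInter w (b :: t)
def pvInRange (L : List Int) : Prop := ∀ x ∈ L, 0 ≤ x ∧ x < 10
-- A's inner-loop body with the zero-count guard removed
def pvStepU (H : List Int) (w : Int) (st2 : List Int × Int) (p : Int × Int) : List Int × Int :=
  (pvAddAt (pvAddAt st2.1 (pvI1 w p) (pvCnt H p)) (pvI2 w p) (pvCnt H p),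
   st2.2 + pvCnt H p * pvD w p.1 p.2)

theorem pv_foldl_nest {σ : Type} (A B : List Int) (f : σ → Int → Int → σ) (s : σ) :
    A.foldl (fun s a => B.foldl (fun s b => f s a b) s) s
      = (A.flatMap fun a => B.map (Prod.mk a)).foldl (fun s p => f s p.1 p.2) s := by
  induction A generalizing s with
  | nil => rfl
  | cons a A ih => simp [List.foldl_map, ih]

theorem pvAddAt_zero (l : List Int) (i : Int) (h : 0 ≤ i) : pvAddAt l i 0 = l := by
  unfold pvAddAt
  rw [PySem.List.pySetD_of_nonneg _ _ h, add_zero, ← Int.toNat_of_nonneg h,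
    PySem.List.pyGetD_natCast]
  rcases lt_or_ge i.toNat l.length with hlt | hge
  · rw [List.getD_eq_getElem _ _ hlt]
    exact List.set_getElem_self hlt
  · exact List.set_eq_of_length_le hge

theorem pv_length_pvAddAt (l : List Int) (i v : Int) : (pvAddAt l i v).length = l.length := by
  simp [pvAddAt, PySem.List.length_pySetD]

theorem pv_getD_pvAddAt (l : List Int) (i v : Int) (j : Nat) (h0 : 0 ≤ i) (hj : j < l.length) :
    (pvAddAt l i v).getD j 0 = l.getD j 0 + if i = (j : Int) then v else 0 := by
  unfold pvAddAt
  rw [PySem.List.pySetD_of_nonneg _ _ h0, ← Int.toNat_of_nonneg h0,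
    PySem.List.pyGetD_natCast]
  rcases lt_or_ge i.toNat l.length with hlt | hge
  · rw [List.getD_eq_getElem _ _ (by simpa using hj),
      List.getD_eq_getElem _ _ hj, List.getElem_set]
    simp only [Int.toNat_natCast, Nat.cast_inj]
    by_cases hij : i.toNat = j
    · rw [if_pos hij, if_pos hij, List.getD_eq_getElem _ _ hlt]
      simp [hij]
    · rw [if_neg hij, if_neg hij, add_zero]
  · rw [List.set_eq_of_length_le (show l.length ≤ ((i.toNat : Int)).toNat by omega),
      if_neg (fun hc => by omega), add_zero]

theorem pv_pyGetD_toNat (l : List Int) (i : Int) (h : 0 ≤ i) :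
    PySem.List.pyGetD l i 0 = l.getD i.toNat 0 := by
  conv_lhs => rw [← Int.toNat_of_nonneg h]
  rw [PySem.List.pyGetD_natCast]

theorem pv_scatter_length (L : List (Int × Int)) (l0 : List Int) :
    (L.foldl (fun l p => pvAddAt l p.1 p.2) l0).length = l0.length := by
  induction L generalizing l0 with
  | nil => rfl
  | cons p L ih => simp [ih, pv_length_pvAddAt]

theorem pv_scatter_char (L : List (Int × Int)) (l0 : List Int) (j : Nat)
    (hL : ∀ p ∈ L, 0 ≤ p.1) (hj : j < l0.length) :
    (L.foldl (fun l p => pvAddAt l p.1 p.2) l0).getD j 0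
      = l0.getD j 0 + (L.map (fun p => if p.1 = (j : Int) then p.2 else 0)).sum := by
  induction L generalizing l0 with
  | nil => simp
  | cons p L ih =>
    simp only [List.foldl_cons, List.map_cons, List.sum_cons]
    rw [ih _ (fun q hq => hL q (List.mem_cons_of_mem _ hq))
        (by rw [pv_length_pvAddAt]; exact hj)]
    rw [pv_getD_pvAddAt l0 p.1 p.2 j (hL p (List.mem_cons_self ..)) hj]
    ring

theorem pv_double_single {γ : Type} (G : List γ) (l0 : List Int)
    (i1 i2 c : γ → Int) :
    G.foldl (fun l x => pvAddAt (pvAddAt l (i1 x) (c x)) (i2 x) (c x)) l0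
      = (G.flatMap fun x => [(i1 x, c x), (i2 x, c x)]).foldl (fun l p => pvAddAt l p.1 p.2) l0 := by
  induction G generalizing l0 with
  | nil => rfl
  | cons x G ih => simp [ih]

theorem pv_sum_map_flatMap_pair {γ : Type} (G : List γ) (u v : γ → Int × Int)
    (h : Int × Int → Int) :
    ((G.flatMap fun x => [u x, v x]).map h).sum
      = (G.map fun x => h (u x)).sum + (G.map fun x => h (v x)).sum := by
  induction G with
  | nil => simp
  | cons x G ih => simp [ih]; ring

theorem pv_sum_ite_unique {γ : Type} [DecidableEq γ] (L : List γ) (x0 : γ) (f : γ → Int)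
    (hnd : L.Nodup) (hx : x0 ∈ L) :
    (L.map fun x => if x = x0 then f x else 0).sum = f x0 := by
  induction L with
  | nil => cases hx
  | cons y L ih =>
    by_cases hy : y = x0
    · subst hy
      simp only [List.map_cons, List.sum_cons]
      have hz : (L.map fun x => if x = y then f x else 0).sum = 0 := by
        have hny := (List.nodup_cons.1 hnd).1
        rw [List.sum_eq_zero]
        intro z hz
        rcases List.mem_map.1 hz with ⟨x, hxL, rfl⟩
        rw [if_neg]; rintro rfl; exact hny hxL
      rw [hz]; simp
    · have hx' : x0 ∈ L := by
        rcases List.mem_cons.1 hx with h | h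
        · exact absurd h.symm hy
        · exact h
      simp only [List.map_cons, List.sum_cons, if_neg hy]
      rw [ih (List.nodup_cons.1 hnd).2 hx']; ring

theorem pv_sum_map_add {γ : Type} (L : List γ) (f g : γ → Int) :
    (L.map fun x => f x + g x).sum = (L.map f).sum + (L.map g).sum := by
  induction L with
  | nil => simp
  | cons x L ih => simp [ih]; ring

theorem pv_mem_pvGrid (p : Int × Int) :
    p ∈ pvGrid ↔ 0 ≤ p.1 ∧ p.1 < 10 ∧ 0 ≤ p.2 ∧ p.2 < 10 := by
  cases p with
  | mk a b =>
    simp only [pvGrid, List.mem_flatMap, List.mem_map, PySem.List.mem_pyRange_one]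
    constructor
    · rintro ⟨a', ⟨h1, h2⟩, b', hb', heq⟩
      cases heq; exact ⟨h1, h2, hb'.1, hb'.2⟩
    · rintro ⟨h1, h2, h3, h4⟩
      exact ⟨a, ⟨h1, h2⟩, b, ⟨h3, h4⟩, rfl⟩

theorem pv_grid_nodup : pvGrid.Nodup := by decide

theorem pvD_nonneg (w a b : Int) : 0 ≤ pvD w a b :=
  PySem.Int.mod_nonneg _ (show (0:Int) < 10 by norm_num)

theorem pvD_lt (w a b : Int) : pvD w a b < 10 :=
  PySem.Int.mod_lt _ (show (0:Int) < 10 by norm_num)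

theorem pv_getD_rep (i : Int) (h : 0 ≤ i) :
    PySem.List.pyGetD (List.replicate 100 (0 : Int)) i 0 = 0 := by
  rw [pv_pyGetD_toNat _ _ h]
  rcases lt_or_ge i.toNat 100 with hlt | hge
  · rw [List.getD_eq_getElem _ _ (by simpa using hlt)]
    exact List.getElem_replicate ..
  · rw [List.getD_eq_default _ _ (by simpa using hge)]

-- the central counting lemma: a sum over the 10×10 grid weighted by the histogram of P
-- is the plain sum over P
theorem pv_weighted_aux (P : List (Int × Int)) (f : Int × Int → Int) :
    ∀ (base : List Int), (∀ p ∈ P, p ∈ pvGrid) → base.length = 100 →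
    (pvGrid.map (fun p =>
        PySem.List.pyGetD (P.foldl (fun pc ab => pvAddAt pc (10 * ab.1 + ab.2) 1) base)
          (10 * p.1 + p.2) 0 * f p)).sum
      = (pvGrid.map (fun p => PySem.List.pyGetD base (10 * p.1 + p.2) 0 * f p)).sum
        + (P.map f).sum := by
  induction P with
  | nil => intro base hP hb; simp
  | cons q P ih =>
    intro base hP hb
    have hq := hP q (List.mem_cons_self ..)
    obtain ⟨hq1, hq2, hq3, hq4⟩ := (pv_mem_pvGrid q).1 hq
    simp only [List.foldl_cons, List.map_cons, List.sum_cons]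
    rw [ih _ (fun p hp => hP p (List.mem_cons_of_mem _ hp))
        (by rw [pv_length_pvAddAt]; exact hb)]
    have hstep : (pvGrid.map (fun p =>
        PySem.List.pyGetD (pvAddAt base (10 * q.1 + q.2) 1) (10 * p.1 + p.2) 0 * f p)).sum
        = (pvGrid.map (fun p => PySem.List.pyGetD base (10 * p.1 + p.2) 0 * f p)).sum + f q := by
      have hcong : pvGrid.map (fun p =>
          PySem.List.pyGetD (pvAddAt base (10 * q.1 + q.2) 1) (10 * p.1 + p.2) 0 * f p)
          = pvGrid.map (fun p => PySem.List.pyGetD base (10 * p.1 + p.2) 0 * f p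
              + (if p = q then f p else 0)) := by
        apply List.map_congr_left
        intro p hp
        obtain ⟨h1, h2, h3, h4⟩ := (pv_mem_pvGrid p).1 hp
        have hidx : 0 ≤ 10 * p.1 + p.2 := by omega
        rw [pv_pyGetD_toNat _ _ hidx, pv_pyGetD_toNat _ _ hidx,
          pv_getD_pvAddAt base _ 1 (10 * p.1 + p.2).toNat (by omega) (by omega)]
        have hEq : ((10 * q.1 + q.2 = (((10 * p.1 + p.2).toNat : Nat) : Int))) ↔ p = q := by
          rw [Int.toNat_of_nonneg hidx]
          constructor
          · intro h
            have : p.1 = q.1 ∧ p.2 = q.2 := by omega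
            exact Prod.ext this.1 this.2
          · rintro rfl; rfl
        by_cases hpq : p = q
        · rw [if_pos (hEq.2 hpq), if_pos hpq]; ring
        · rw [if_neg (fun hc => hpq (hEq.1 hc)), if_neg hpq]; ring
      rw [hcong, pv_sum_map_add, pv_sum_ite_unique pvGrid q f pv_grid_nodup hq]
    rw [hstep]; ring

theorem pv_weighted (P : List (Int × Int)) (f : Int × Int → Int)
    (hP : ∀ p ∈ P, p ∈ pvGrid) :
    (pvGrid.map (fun p => pvCnt (pvHist P) p * f p)).sum = (P.map f).sum := by
  unfold pvCnt pvHist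
  rw [pv_weighted_aux P f _ hP (by simp)]
  have hz : (pvGrid.map (fun p =>
      PySem.List.pyGetD (List.replicate 100 (0:Int)) (10 * p.1 + p.2) 0 * f p)).sum = 0 := by
    rw [List.sum_eq_zero]
    intro z hz
    rcases List.mem_map.1 hz with ⟨p, hp, rfl⟩
    obtain ⟨h1, h2, h3, h4⟩ := (pv_mem_pvGrid p).1 hp
    rw [pv_getD_rep _ (by omega), zero_mul]
  rw [hz, zero_add]

-- A's new-counts fold equals the histogram of the spawned child pairs
theorem pv_counts_eq (P : List (Int × Int)) (w : Int) (hP : ∀ p ∈ P, p ∈ pvGrid) :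
    pvGrid.foldl (fun l p =>
        pvAddAt (pvAddAt l (pvI1 w p) (pvCnt (pvHist P) p)) (pvI2 w p) (pvCnt (pvHist P) p))
      (List.replicate 100 (0 : Int))
      = pvHist (P.flatMap (pvChild w)) := by
  rw [pv_double_single pvGrid _ (pvI1 w) (pvI2 w) (pvCnt (pvHist P))]
  have hRHS : pvHist (P.flatMap (pvChild w))
      = ((P.flatMap (pvChild w)).map (fun ab => (10 * ab.1 + ab.2, (1 : Int)))).foldl
          (fun l p => pvAddAt l p.1 p.2) (List.replicate 100 (0 : Int)) := by
    unfold pvHist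
    rw [List.foldl_map]
  rw [hRHS]
  have hnn1 : ∀ p ∈ (pvGrid.flatMap fun x =>
      [(pvI1 w x, pvCnt (pvHist P) x), (pvI2 w x, pvCnt (pvHist P) x)]), 0 ≤ p.1 := by
    intro p hp
    rcases List.mem_flatMap.1 hp with ⟨q, hq, hmem⟩
    obtain ⟨h1, h2, h3, h4⟩ := (pv_mem_pvGrid q).1 hq
    have hd1 := pvD_nonneg w q.1 q.2
    simp only [List.mem_cons, List.not_mem_nil, or_false] at hmem
    rcases hmem with rfl | rfl
    · show 0 ≤ pvI1 w q; unfold pvI1; omega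
    · show 0 ≤ pvI2 w q; unfold pvI2; omega
  have hnn2 : ∀ p ∈ ((P.flatMap (pvChild w)).map (fun ab => (10 * ab.1 + ab.2, (1 : Int)))),
      0 ≤ p.1 := by
    intro p hp
    rcases List.mem_map.1 hp with ⟨ab, hab, rfl⟩
    rcases List.mem_flatMap.1 hab with ⟨q, hq, hmem⟩
    obtain ⟨h1, h2, h3, h4⟩ := (pv_mem_pvGrid q).1 (hP q hq)
    have hd1 := pvD_nonneg w q.1 q.2
    simp only [pvChild, List.mem_cons, List.not_mem_nil, or_false] at hmem
    rcases hmem with rfl | rfl <;> simp only <;> omega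
  apply List.ext_getElem
  · rw [pv_scatter_length, pv_scatter_length]
  intro j hj1 hj2
  have hj100 : j < 100 := by
    have := hj1; rw [pv_scatter_length] at this; simpa using this
  rw [← List.getD_eq_getElem _ 0 hj1, ← List.getD_eq_getElem _ 0 hj2]
  rw [pv_scatter_char _ _ j hnn1 (by simpa using hj100),
      pv_scatter_char _ _ j hnn2 (by simpa using hj100)]
  congr 1
  rw [pv_sum_map_flatMap_pair pvGrid
    (fun p => (pvI1 w p, pvCnt (pvHist P) p)) (fun p => (pvI2 w p, pvCnt (pvHist P) p))
    (fun q => if q.1 = (j : Int) then q.2 else 0)]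
  have hL1 : (pvGrid.map fun p => if pvI1 w p = (j:Int) then pvCnt (pvHist P) p else 0)
      = pvGrid.map fun p => pvCnt (pvHist P) p * (if pvI1 w p = (j:Int) then 1 else 0) := by
    apply List.map_congr_left; intro p _; by_cases h : pvI1 w p = (j:Int) <;> simp [h]
  have hL2 : (pvGrid.map fun p => if pvI2 w p = (j:Int) then pvCnt (pvHist P) p else 0)
      = pvGrid.map fun p => pvCnt (pvHist P) p * (if pvI2 w p = (j:Int) then 1 else 0) := by
    apply List.map_congr_left; intro p _; by_cases h : pvI2 w p = (j:Int) <;> simp [h]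
  simp only [hL1, hL2]
  rw [pv_weighted P _ hP, pv_weighted P _ hP]
  -- right side: map over the child flatMap
  have hR : ((P.flatMap (pvChild w)).map (fun ab => ((10 * ab.1 + ab.2 : Int), (1 : Int)))).map
        (fun q => if q.1 = (j : Int) then q.2 else 0)
      = (P.flatMap fun ab => [((pvI1 w ab, (1:Int)) : Int × Int), (pvI2 w ab, 1)]).map
        (fun q => if q.1 = (j : Int) then q.2 else 0) := by
    simp only [List.map_flatMap]
    refine congrFun (congrArg List.flatMap ?_) P
    funext ab
    simp [pvChild, pvI1, pvI2]
  rw [hR, pv_sum_map_flatMap_pair P (fun ab => ((pvI1 w ab, (1:Int)) : Int × Int))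
    (fun ab => (pvI2 w ab, 1)) (fun q => if q.1 = (j : Int) then q.2 else 0)]

-- A's one-generation step, characterised
theorem pv_stepA_char (cw : Int) (L : List Int) (x : Int) (hL : pvInRange L) :
    pvStepA (cw, pvHist (L.zip L.tail)) x
      = (cw + ((L.zip L.tail).map
            (fun ab => pvD (PySem.Int.mod cw 10) ab.1 ab.2)).sum,
         pvHist ((L.zip L.tail).flatMap (pvChild (PySem.Int.mod cw 10)))) := by
  have hP : ∀ p ∈ L.zip L.tail, p ∈ pvGrid := by
    intro p hp
    obtain ⟨h1, h2⟩ := List.of_mem_zip hp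
    have h2' : p.2 ∈ L := L.tail_subset h2
    obtain ⟨ha, hb⟩ := hL p.1 h1
    obtain ⟨hc, hd⟩ := hL p.2 h2'
    exact (pv_mem_pvGrid p).2 ⟨ha, hb, hc, hd⟩
  set w := PySem.Int.mod cw 10 with hw
  set H := pvHist (L.zip L.tail) with hH
  simp only [pvStepA]
  rw [pv_foldl_nest]
  have hg : ((PySem.List.pyRange 0 10 1).flatMap
      (fun a => (PySem.List.pyRange 0 10 1).map (Prod.mk a))) = pvGrid := rfl
  rw [hg]
  rw [PySem.List.foldl_congr_mem pvGrid _ (pvStepU H w) _ (by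
      intro acc p hp
      obtain ⟨h1, h2, h3, h4⟩ := (pv_mem_pvGrid p).1 hp
      obtain ⟨a, b⟩ := p
      simp only at h1 h2 h3 h4
      show (if PySem.List.pyGetD H (10 * a + b) 0 = 0 then acc else _) = _
      by_cases hc : PySem.List.pyGetD H (10 * a + b) 0 = 0
      · rw [if_pos hc]
        unfold pvStepU pvCnt pvI1 pvI2
        simp only [hc, zero_mul, add_zero]
        have hd1 := pvD_nonneg w a b
        rw [pvAddAt_zero _ _ (by omega), pvAddAt_zero _ _ (by omega)]
      · rw [if_neg hc]
        unfold pvStepU pvCnt pvI1 pvI2 pvD pvS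
        rfl)]
  unfold pvStepU
  rw [PySem.List.foldl_prod_mk
    (f := fun l p => pvAddAt (pvAddAt l (pvI1 w p) (pvCnt H p)) (pvI2 w p) (pvCnt H p))
    (g := fun t p => t + pvCnt H p * pvD w p.1 p.2)]
  rw [PySem.List.foldl_add, zero_add]
  rw [pv_counts_eq (L.zip L.tail) w hP]
  have hsum : (pvGrid.map fun p => pvCnt H p * pvD w p.1 p.2).sum
      = ((L.zip L.tail).map fun ab => pvD w ab.1 ab.2).sum := by
    rw [hH]; exact pv_weighted (L.zip L.tail) _ hP
  rw [hsum]

-- digits[-1] of a nonempty list is its last element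
theorem pv_neg_one (L : List Int) (h : L ≠ []) :
    PySem.List.pyGetD L (-1) 0 = L.getLast h := by
  have hn : 1 ≤ L.length := List.length_pos_of_ne_nil h
  simp only [PySem.List.pyGetD, PySem.List.pyGet?, PySem.List.pyIdx?]
  rw [if_neg (by omega), if_pos (by
    have : (1 : Int) ≤ (L.length : Int) := by exact_mod_cast hn
    omega)]
  simp only [Option.bind]
  rw [List.getElem?_eq_getElem (by omega : L.length - (-(-1:Int)).toNat < L.length)]
  rw [List.getLast_eq_getElem]
  rfl

-- the head of the interleave of a nonempty list is its head
theorem pv_inter_head (w b : Int) (t : List Int) :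
    ∃ r, pvInter w (b :: t) = b :: r := by
  cases t with
  | nil => exact ⟨[], rfl⟩
  | cons c t' => exact ⟨_, rfl⟩

-- B's built list is the interleave
theorem pv_build_inter (w : Int) (L : List Int) (h : L ≠ []) :
    ((L.zip L.tail).flatMap (fun ab => [ab.1, pvD w ab.1 ab.2])) ++ [L.getLast h]
      = pvInter w L := by
  induction L with
  | nil => exact absurd rfl h
  | cons a t ih =>
    cases t with
    | nil => rfl
    | cons b t' =>
      have hne : b :: t' ≠ [] := by simp
      have hlast : (a :: b :: t').getLast h = (b :: t').getLast hne :=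
        List.getLast_cons hne
      show ([a, pvD w a b] ++ ((b :: t').zip (b :: t').tail).flatMap
          (fun ab => [ab.1, pvD w ab.1 ab.2])) ++ [(a :: b :: t').getLast h]
        = a :: pvD w a b :: pvInter w (b :: t')
      rw [hlast, List.append_assoc, ih hne]
      rfl

-- pairs of the interleave are the child pairs
theorem pv_pairs_inter (w : Int) (L : List Int) :
    (pvInter w L).zip (pvInter w L).tail
      = (L.zip L.tail).flatMap (pvChild w) := by
  induction L with
  | nil => rfl
  | cons a t ih =>
    cases t with
    | nil => rfl
    | cons b t' =>
      obtain ⟨r, hr⟩ := pv_inter_head w b t'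
      show (pvInter w (a :: b :: t')).zip (pvInter w (a :: b :: t')).tail
        = pvChild w (a, b) ++ ((b :: t').zip (b :: t').tail).flatMap (pvChild w)
      have hI : pvInter w (a :: b :: t') = a :: pvD w a b :: b :: r := by
        show a :: pvD w a b :: pvInter w (b :: t') = _
        rw [hr]
      rw [hI]
      show (a, pvD w a b) :: (pvD w a b, b) :: ((b :: r).zip r)
        = pvChild w (a, b) ++ ((b :: t').zip (b :: t').tail).flatMap (pvChild w)
      have hz : (b :: r).zip r = (pvInter w (b :: t')).zip (pvInter w (b :: t')).tail := by
        rw [hr]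
        rfl
      rw [hz, ih]
      rfl

theorem pv_inter_range (w : Int) (L : List Int) (hL : pvInRange L) :
    pvInRange (pvInter w L) := by
  induction L with
  | nil => exact hL
  | cons a t ih =>
    cases t with
    | nil => exact hL
    | cons b t' =>
      intro x hx
      have htail : pvInRange (b :: t') := fun y hy => hL y (List.mem_cons_of_mem _ hy)
      rcases List.mem_cons.1 hx with rfl | hx
      · exact hL x (List.mem_cons_self ..)
      rcases List.mem_cons.1 hx with rfl | hx
      · exact ⟨pvD_nonneg w a b, pvD_lt w a b⟩
      · exact ih htail x hx

theorem pv_zipfold_nat {σ : Type} (l : List Int) (f : σ → Int → Int → σ) (s : σ) :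
    (List.range (l.length - 1)).foldl (fun st k => f st (l.getD k 0) (l.getD (k + 1) 0)) s
      = (l.zip l.tail).foldl (fun st ab => f st ab.1 ab.2) s := by
  induction l generalizing s with
  | nil => rfl
  | cons x l ih =>
    cases l with
    | nil => rfl
    | cons y ys =>
      have hlen : (x :: y :: ys : List Int).length - 1 = ys.length + 1 := by simp
      rw [hlen, List.range_succ_eq_map]
      simp only [List.foldl_cons, List.foldl_map, List.getD_cons_zero, List.getD_cons_succ]
      have := ih (f s x y)
      simp only [List.length_cons, Nat.add_sub_cancel, List.getD_cons_succ] at this ⊢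
      rw [this]
      simp

theorem pv_zipfold (l : List Int) (init : List Int) :
    (PySem.List.pyRange 0 ((l.length : Int) - 1) 1).foldl
      (fun pc i => pvAddAt pc (10 * PySem.List.pyGetD l i 0 + PySem.List.pyGetD l (i + 1) 0) 1) init
      = (l.zip l.tail).foldl (fun pc ab => pvAddAt pc (10 * ab.1 + ab.2) 1) init := by
  cases l with
  | nil => rfl
  | cons x xs =>
    have hlen : ((x :: xs : List Int).length : Int) - 1 = ((xs.length : Nat) : Int) := by
      simp
    rw [hlen, PySem.List.pyRange_zero_natCast, List.foldl_map]
    have hcast : ∀ (pc : List Int) (k : Nat),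
        pvAddAt pc (10 * PySem.List.pyGetD (x :: xs) (↑k) 0
          + PySem.List.pyGetD (x :: xs) ((↑k) + 1) 0) 1
        = pvAddAt pc (10 * (x :: xs).getD k 0 + (x :: xs).getD (k + 1) 0) 1 := by
      intro pc k
      have h1 : ((k : Int) + 1) = ((k + 1 : Nat) : Int) := by push_cast; ring
      rw [h1, PySem.List.pyGetD_natCast, PySem.List.pyGetD_natCast]
    simp only [hcast]
    have := pv_zipfold_nat (x :: xs)
      (fun st a b => pvAddAt st (10 * a + b) 1) init
    simp only [List.length_cons, Nat.add_sub_cancel] at this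
    exact this

theorem pvCharEq (c c' : Char) (h : c.toNat = c'.toNat) : c = c' := by
  apply Char.ext; apply UInt32.toNat_inj.mp; exact h

theorem pvChar_cases (c : Char) (h : ('0' ≤ c && c ≤ '9') = true) :
    c ∈ ['0','1','2','3','4','5','6','7','8','9'] := by
  rw [Bool.and_eq_true, decide_eq_true_eq, decide_eq_true_eq] at h
  obtain ⟨h1, h2⟩ := h
  have hn1 : 48 ≤ c.toNat := h1
  have hn2 : c.toNat ≤ 57 := h2
  interval_cases hv : c.toNat <;>
    first
    | (rw [pvCharEq c '0' hv]; decide)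
    | (rw [pvCharEq c '1' hv]; decide)
    | (rw [pvCharEq c '2' hv]; decide)
    | (rw [pvCharEq c '3' hv]; decide)
    | (rw [pvCharEq c '4' hv]; decide)
    | (rw [pvCharEq c '5' hv]; decide)
    | (rw [pvCharEq c '6' hv]; decide)
    | (rw [pvCharEq c '7' hv]; decide)
    | (rw [pvCharEq c '8' hv]; decide)
    | (rw [pvCharEq c '9' hv]; decide)

theorem pvVal_range (c : Char) (h : ('0' ≤ c && c ≤ '9') = true) :
    0 ≤ (PySem.Int.ofStr? (String.ofList [c])).getD 0
      ∧ (PySem.Int.ofStr? (String.ofList [c])).getD 0 < 10 := by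
  have hm := pvChar_cases c h
  fin_cases hm <;> decide

theorem pv_digits_range (colony : String) (hpre : Pre_compute_weight colony 0) :
    pvInRange (pvDigits colony) := by
  intro x hx
  rcases List.mem_map.1 hx with ⟨c, hc, rfl⟩
  have := List.all_eq_true.1 hpre c hc
  exact pvVal_range c this

-- the ghost list-level dynamics: inserted sum and weight run (neither port materialises these)
def pvIns (w : Int) (L : List Int) : Int :=
  ((L.zip L.tail).map (fun ab => pvD w ab.1 ab.2)).sum

def pvRun : Nat → Int → List Int → Int
  | 0, s, _ => s
  | g + 1, s, L =>
      pvRun g (s + pvIns (PySem.Int.mod s 10) L) (pvInter (PySem.Int.mod s 10) L)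

def pvResSeq : Nat → Int → List Int → List Int
  | 0, _, _ => []
  | g + 1, s, L =>
      PySem.Int.mod s 10
        :: pvResSeq g (s + pvIns (PySem.Int.mod s 10) L) (pvInter (PySem.Int.mod s 10) L)

def pvAddSum : List Int → List Int → Int
  | [], _ => 0
  | w :: ws, L => pvIns w L + pvAddSum ws (pvInter w L)

-- per-pair future contribution (B's backward DP, mathematically)
def pvC : List Int → Int → Int → Int
  | [], _, _ => 0
  | w :: ws, a, b => pvD w a b + pvC ws a (pvD w a b) + pvC ws (pvD w a b) b

-- B's scalar residue recurrence
def pvWs (f : Int) : Nat → Int → Int → List Int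
  | 0, _, _ => []
  | g + 1, w, m => w :: pvWs f g (PySem.Int.mod (w + m * w + f) 10) (PySem.Int.mod (2 * m) 10)

def pvF (L : List Int) : Int :=
  if 2 ≤ L.length then L.getD 0 0 - (L.getLast?).getD 0 else 0

-- B's per-generation backward table rebuild
def pvBStep (nxt : List Int) (w : Int) : List Int :=
  (PySem.List.pyRange 0 10 1).foldl
    (fun (c : List Int) a =>
      (PySem.List.pyRange 0 10 1).foldl
        (fun (c : List Int) b =>
          let d := PySem.Int.mod (w + a - b) 10
          PySem.List.pySetD c (10 * a + b)
            (d + PySem.List.pyGetD nxt (10 * a + d) 0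
               + PySem.List.pyGetD nxt (10 * d + b) 0)) c)
    (List.replicate 100 (0 : Int))

def pvTbl (ws : List Int) : List Int :=
  ws.reverse.foldl pvBStep (List.replicate 100 (0 : Int))

-- the three-way signature rule collapses into one mod
theorem pvD_collapse (w a b : Int) : pvD w a b = PySem.Int.mod (w + a - b) 10 := by
  unfold pvD pvS
  simp only [PySem.Int.mod_eq_emod_of_pos (show (0:Int) < 10 by norm_num)]
  split_ifs <;> omega

-- ===== A's fold is the ghost run =====
theorem pv_fold_run (G : List Int) : ∀ (s : Int) (L : List Int), pvInRange L →
    (G.foldl pvStepA (s, pvHist (L.zip L.tail))).1 = pvRun G.length s L := by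
  induction G with
  | nil => intro s L _; rfl
  | cons x G ih =>
    intro s L hL
    simp only [List.foldl_cons, List.length_cons]
    rw [pv_stepA_char s L x hL, ← pv_pairs_inter]
    show (G.foldl pvStepA (s + pvIns (PySem.Int.mod s 10) L,
        pvHist ((pvInter (PySem.Int.mod s 10) L).zip (pvInter (PySem.Int.mod s 10) L).tail))).1
      = pvRun (G.length + 1) s L
    rw [ih _ _ (pv_inter_range _ _ hL)]
    rfl

theorem pv_run_addSum (g : Nat) : ∀ (s : Int) (L : List Int),
    pvRun g s L = s + pvAddSum (pvResSeq g s L) L := by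
  induction g with
  | zero => intro s L; simp [pvRun, pvResSeq, pvAddSum]
  | succ g ih =>
    intro s L
    show pvRun g _ _ = _
    rw [ih]
    show _ = s + (pvIns (PySem.Int.mod s 10) L + pvAddSum _ _)
    ring

-- ===== the backward contribution identity =====
theorem pv_addSum_C (ws : List Int) : ∀ (L : List Int),
    pvAddSum ws L = ((L.zip L.tail).map (fun ab => pvC ws ab.1 ab.2)).sum := by
  induction ws with
  | nil =>
    intro L
    show (0 : Int) = _
    rw [List.sum_eq_zero]
    · intro z hz
      rcases List.mem_map.1 hz with ⟨p, _, rfl⟩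
      rfl
  | cons w ws ih =>
    intro L
    show pvIns w L + pvAddSum ws (pvInter w L) = _
    rw [ih (pvInter w L), pv_pairs_inter w L, List.map_flatMap]
    have hsplit : (((L.zip L.tail).flatMap fun ab =>
        (pvChild w ab).map (fun p => pvC ws p.1 p.2))).sum
        = (((L.zip L.tail).flatMap fun ab =>
            [((ab.1, pvD w ab.1 ab.2) : Int × Int), (pvD w ab.1 ab.2, ab.2)]).map
              (fun p => pvC ws p.1 p.2)).sum := by
      rw [List.map_flatMap]; rfl
    rw [hsplit, pv_sum_map_flatMap_pair (L.zip L.tail)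
      (fun ab => ((ab.1, pvD w ab.1 ab.2) : Int × Int))
      (fun ab => ((pvD w ab.1 ab.2, ab.2) : Int × Int))
      (fun p => pvC ws p.1 p.2)]
    unfold pvIns
    rw [← add_assoc, ← pv_sum_map_add, ← pv_sum_map_add]
    apply congrArg List.sum
    apply List.map_congr_left
    intro ab _
    rfl

-- ===== residue recurrence =====
theorem pv_tele (a : Int) (t : List Int) :
    (((a :: t).zip t).map (fun ab => ab.1 - ab.2)).sum
      = a - (a :: t).getLast (by simp) := by
  induction t generalizing a with
  | nil => simp
  | cons b t' ih =>
    have := ih b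
    simp only [List.zip_cons_cons, List.map_cons, List.sum_cons] at this ⊢
    rw [List.getLast_cons (by simp), this]
    ring

theorem pv_sum_const (P : List (Int × Int)) (w : Int) :
    (P.map (fun _ => w)).sum = (P.length : Int) * w := by
  induction P with
  | nil => simp
  | cons p P ih =>
    simp only [List.map_cons, List.sum_cons, List.length_cons, ih]
    push_cast
    ring

theorem pv_ins_emod (w : Int) (L : List Int) :
    pvIns w L % 10
      = (((L.zip L.tail).length : Int) * w
          + ((L.zip L.tail).map (fun ab => ab.1 - ab.2)).sum) % 10 := by
  unfold pvIns
  have key : ∀ (P : List (Int × Int)),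
      (P.map (fun ab => pvD w ab.1 ab.2)).sum % 10
        = (P.map (fun ab => w + ab.1 - ab.2)).sum % 10 := by
    intro P
    induction P with
    | nil => rfl
    | cons p P ih =>
      simp only [List.map_cons, List.sum_cons]
      have hd : pvD w p.1 p.2 % 10 = (w + p.1 - p.2) % 10 := by
        rw [pvD_collapse, PySem.Int.mod_eq_emod_of_pos (show (0:Int) < 10 by norm_num)]
        omega
      omega
  rw [key]
  have hsum : ((L.zip L.tail).map (fun ab => w + ab.1 - ab.2)).sum
      = ((L.zip L.tail).length : Int) * w
        + ((L.zip L.tail).map (fun ab => ab.1 - ab.2)).sum := by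
    have : ((L.zip L.tail).map (fun ab => w + ab.1 - ab.2))
        = ((L.zip L.tail).map (fun ab => w + (ab.1 - ab.2))) := by
      apply List.map_congr_left; intro p _; ring
    rw [this, pv_sum_map_add (L.zip L.tail) (fun _ => w) (fun ab => ab.1 - ab.2),
      pv_sum_const]
  rw [hsum]

theorem pv_zip_len (L : List Int) : (L.zip L.tail).length = L.length - 1 := by
  cases L with
  | nil => rfl
  | cons a t => simp [List.length_zip]

theorem pv_inter_len (w : Int) (L : List Int) (h : 2 ≤ L.length) :
    (pvInter w L).length = 2 * L.length - 1 := by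
  induction L with
  | nil => simp at h
  | cons a t ih =>
    cases t with
    | nil => simp at h
    | cons b t' =>
      cases t' with
      | nil => rfl
      | cons c t'' =>
        have := ih (by simp)
        show (a :: pvD w a b :: pvInter w (b :: c :: t'')).length = _
        simp only [List.length_cons] at this ⊢
        omega

theorem pv_inter_pairs_len (w : Int) (L : List Int) :
    ((pvInter w L).zip (pvInter w L).tail).length = 2 * (L.zip L.tail).length := by
  rw [pv_pairs_inter]
  induction (L.zip L.tail) with
  | nil => rfl
  | cons p P ih => simp [pvChild] at ih ⊢; omega

theorem pv_inter_head_getD (w : Int) (L : List Int) (h : L ≠ []) :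
    (pvInter w L).getD 0 0 = L.getD 0 0 := by
  cases L with
  | nil => exact absurd rfl h
  | cons b t =>
    obtain ⟨r, hr⟩ := pv_inter_head w b t
    rw [hr]; rfl

theorem pv_inter_last (w : Int) (L : List Int) (h : L ≠ []) :
    ((pvInter w L).getLast?).getD 0 = (L.getLast?).getD 0 := by
  rw [← pv_build_inter w L h]
  rw [List.getLast?_concat, List.getLast?_eq_some_getLast h]

theorem pv_F_inter (w : Int) (L : List Int) (h : 2 ≤ L.length) :
    pvF (pvInter w L) = pvF L := by
  have hne : L ≠ [] := by cases L <;> simp_all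
  unfold pvF
  rw [if_pos h, if_pos (by rw [pv_inter_len w L h]; omega)]
  rw [pv_inter_head_getD w L hne, pv_inter_last w L hne]

-- one step of the residue recurrence is exact
theorem pv_res_step (s : Int) (L : List Int) :
    PySem.Int.mod (s + pvIns (PySem.Int.mod s 10) L) 10
      = PySem.Int.mod (PySem.Int.mod s 10
          + PySem.Int.mod ((L.zip L.tail).length : Int) 10 * PySem.Int.mod s 10 + pvF L) 10 := by
  simp only [PySem.Int.mod_eq_emod_of_pos (show (0:Int) < 10 by norm_num)]
  set w := s % 10 with hw
  set n := ((L.zip L.tail).length : Int) with hn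
  have hIns : pvIns w L % 10 = (n * w + pvF L) % 10 := by
    rw [pv_ins_emod w L, ← hn]
    by_cases hlen : 2 ≤ L.length
    · have hne : L ≠ [] := by cases L <;> simp_all
      cases L with
      | nil => simp at hlen
      | cons a t =>
        have htel := pv_tele a t
        unfold pvF
        simp only [List.tail_cons]
        rw [if_pos hlen, htel]
        have : (a :: t).getD 0 0 - ((a :: t).getLast?).getD 0
            = a - (a :: t).getLast (by simp) := by
          rw [List.getLast?_eq_some_getLast (by simp : (a :: t) ≠ [])]
          rfl
        rw [this]
    · have hP : L.zip L.tail = [] := by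
        cases L with
        | nil => rfl
        | cons a t => cases t with
          | nil => rfl
          | cons b t' => simp at hlen
      unfold pvF
      rw [if_neg hlen, hP]
      simp
  set m := n % 10 with hm
  obtain ⟨q, hq⟩ : ∃ q, n = 10 * q + m := ⟨n / 10, by omega⟩
  have hXY : n * w + pvF L = (m * w + pvF L) + 10 * (q * w) := by rw [hq]; ring
  rw [hXY] at hIns
  have hgoal : w + m * w + pvF L = w + (m * w + pvF L) := by ring
  rw [hgoal]
  set Y := m * w + pvF L with hY
  set K := q * w with hK
  set I := pvIns w L with hI
  omega

theorem pv_res_ws (g : Nat) : ∀ (s : Int) (L : List Int),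
    pvResSeq g s L
      = pvWs (pvF L) g (PySem.Int.mod s 10)
          (PySem.Int.mod ((L.zip L.tail).length : Int) 10) := by
  induction g with
  | zero => intro s L; rfl
  | succ g ih =>
    intro s L
    show PySem.Int.mod s 10 :: pvResSeq g (s + pvIns (PySem.Int.mod s 10) L)
        (pvInter (PySem.Int.mod s 10) L)
      = PySem.Int.mod s 10 :: pvWs (pvF L) g _ _
    congr 1
    rw [ih]
    by_cases hlen : 2 ≤ L.length
    · rw [pv_F_inter _ _ hlen, pv_res_step s L]
      have hmm : PySem.Int.mod
            (((pvInter (PySem.Int.mod s 10) L).zip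
              (pvInter (PySem.Int.mod s 10) L).tail).length : Int) 10
          = PySem.Int.mod (2 * PySem.Int.mod ((L.zip L.tail).length : Int) 10) 10 := by
        rw [pv_inter_pairs_len]
        simp only [PySem.Int.mod_eq_emod_of_pos (show (0:Int) < 10 by norm_num)]
        push_cast
        omega
      rw [hmm]
    · have hP : L.zip L.tail = [] := by
        cases L with
        | nil => rfl
        | cons a t => cases t with
          | nil => rfl
          | cons b t' => simp at hlen
      have hLI : pvInter (PySem.Int.mod s 10) L = L := by
        cases L with
        | nil => rfl
        | cons a t => cases t with
          | nil => rfl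
          | cons b t' => simp at hlen
      rw [hLI, pv_res_step s L]
      have h0 : PySem.Int.mod ((L.zip L.tail).length : Int) 10 = 0 := by
        rw [hP]; decide
      rw [h0]
      have h20 : PySem.Int.mod (2 * (0:Int)) 10 = 0 := by decide
      rw [h20]

-- ===== B's backward table computes pvC =====
theorem pv_len_pySetD (c : List Int) (i v : Int) :
    (PySem.List.pySetD c i v).length = c.length := by
  simp [PySem.List.length_pySetD]

theorem pv_get_pySetD (c : List Int) (i v j : Int) (hi : 0 ≤ i) (hj : 0 ≤ j)
    (hjlen : j < (c.length : Int)) :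
    PySem.List.pyGetD (PySem.List.pySetD c i v) j 0
      = if i = j then v else PySem.List.pyGetD c j 0 := by
  rw [PySem.List.pySetD_of_nonneg _ _ hi]
  rw [pv_pyGetD_toNat _ _ hj, pv_pyGetD_toNat _ _ hj]
  · by_cases hij : i = j
    · subst hij
      rw [if_pos rfl, List.getD_eq_getElem _ _ (by simp; omega), List.getElem_set_self]
    · rw [if_neg hij]
      rcases lt_or_ge j.toNat c.length with hlt | hge
      · rw [List.getD_eq_getElem _ _ (by simpa using hlt),
          List.getD_eq_getElem _ _ hlt, List.getElem_set_ne (by omega)]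
      · omega

def pvSetFold (Q : List (Int × Int)) (g : Int × Int → Int) (c0 : List Int) : List Int :=
  Q.foldl (fun c q => PySem.List.pySetD c (10 * q.1 + q.2) (g q)) c0

theorem pv_setfold_notmem (Q : List (Int × Int)) (g : Int × Int → Int) :
    ∀ (c0 : List Int) (p : Int × Int), c0.length = 100 → p ∈ pvGrid →
    (∀ q ∈ Q, q ∈ pvGrid) → p ∉ Q →
    PySem.List.pyGetD (pvSetFold Q g c0) (10 * p.1 + p.2) 0
      = PySem.List.pyGetD c0 (10 * p.1 + p.2) 0 := by
  induction Q with
  | nil => intro c0 p _ _ _ _; rfl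
  | cons q Q ih =>
    intro c0 p hlen hp hQ hnm
    obtain ⟨ha1, ha2, ha3, ha4⟩ := (pv_mem_pvGrid p).1 hp
    obtain ⟨hb1, hb2, hb3, hb4⟩ := (pv_mem_pvGrid q).1 (hQ q (List.mem_cons_self ..))
    show PySem.List.pyGetD (pvSetFold Q g (PySem.List.pySetD c0 (10 * q.1 + q.2) (g q)))
        (10 * p.1 + p.2) 0 = _
    rw [ih _ p (by rw [pv_len_pySetD]; exact hlen) hp
      (fun r hr => hQ r (List.mem_cons_of_mem _ hr)) (fun hc => hnm (List.mem_cons_of_mem _ hc))]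
    rw [pv_get_pySetD c0 _ _ _ (by omega) (by omega) (by rw [hlen]; push_cast; omega)]
    rw [if_neg]
    intro hc
    apply hnm
    have : q = p := Prod.ext (by omega) (by omega)
    rw [this]
    exact List.mem_cons_self ..

theorem pv_setfold_mem (Q : List (Int × Int)) (g : Int × Int → Int) :
    ∀ (c0 : List Int) (p : Int × Int), c0.length = 100 → Q.Nodup →
    (∀ q ∈ Q, q ∈ pvGrid) → p ∈ Q →
    PySem.List.pyGetD (pvSetFold Q g c0) (10 * p.1 + p.2) 0 = g p := by
  induction Q with
  | nil => intro _ _ _ _ _ hp; cases hp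
  | cons q Q ih =>
    intro c0 p hlen hnd hQ hp
    show PySem.List.pyGetD (pvSetFold Q g (PySem.List.pySetD c0 (10 * q.1 + q.2) (g q)))
        (10 * p.1 + p.2) 0 = _
    rcases List.mem_cons.1 hp with rfl | hp'
    · rw [pv_setfold_notmem Q g _ p (by rw [pv_len_pySetD]; exact hlen)
        (hQ p (List.mem_cons_self ..)) (fun r hr => hQ r (List.mem_cons_of_mem _ hr))
        ((List.nodup_cons.1 hnd).1)]
      obtain ⟨ha1, ha2, ha3, ha4⟩ := (pv_mem_pvGrid p).1 (hQ p (List.mem_cons_self ..))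
      rw [pv_get_pySetD c0 _ _ _ (by omega) (by omega) (by rw [hlen]; push_cast; omega)]
      rw [if_pos rfl]
    · exact ih _ p (by rw [pv_len_pySetD]; exact hlen) (List.nodup_cons.1 hnd).2
        (fun r hr => hQ r (List.mem_cons_of_mem _ hr)) hp'

set_option maxHeartbeats 1000000 in
theorem pv_bstep_get (nxt : List Int) (w a b : Int)
    (ha1 : 0 ≤ a) (ha2 : a < 10) (hb1 : 0 ≤ b) (hb2 : b < 10) :
    PySem.List.pyGetD (pvBStep nxt w) (10 * a + b) 0
      = pvD w a b + PySem.List.pyGetD nxt (10 * a + pvD w a b) 0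
        + PySem.List.pyGetD nxt (10 * pvD w a b + b) 0 := by
  unfold pvBStep
  rw [pv_foldl_nest]
  have hg : ((PySem.List.pyRange 0 10 1).flatMap
      (fun a => (PySem.List.pyRange 0 10 1).map (Prod.mk a))) = pvGrid := rfl
  rw [hg]
  have hfold : pvGrid.foldl
      (fun (c : List Int) (p : Int × Int) =>
        PySem.List.pySetD c (10 * p.1 + p.2)
          (PySem.Int.mod (w + p.1 - p.2) 10
            + PySem.List.pyGetD nxt (10 * p.1 + PySem.Int.mod (w + p.1 - p.2) 10) 0
            + PySem.List.pyGetD nxt (10 * PySem.Int.mod (w + p.1 - p.2) 10 + p.2) 0))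
      (List.replicate 100 (0 : Int))
      = pvSetFold pvGrid (fun p => pvD w p.1 p.2
          + PySem.List.pyGetD nxt (10 * p.1 + pvD w p.1 p.2) 0
          + PySem.List.pyGetD nxt (10 * pvD w p.1 p.2 + p.2) 0)
        (List.replicate 100 (0 : Int)) := by
    unfold pvSetFold
    apply PySem.List.foldl_congr_mem
    intro c p _
    simp only [pvD_collapse]
  rw [hfold, pv_setfold_mem pvGrid _ _ (a, b) (by simp) pv_grid_nodup
    (fun q hq => hq) ((pv_mem_pvGrid (a, b)).2 ⟨ha1, ha2, hb1, hb2⟩)]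

theorem pv_tbl_cons (w : Int) (ws : List Int) :
    pvTbl (w :: ws) = pvBStep (pvTbl ws) w := by
  unfold pvTbl
  rw [List.reverse_cons]
  simp only [List.foldl_append, List.foldl_cons, List.foldl_nil]

theorem pv_tbl_C (ws : List Int) : ∀ (a b : Int),
    0 ≤ a → a < 10 → 0 ≤ b → b < 10 →
    PySem.List.pyGetD (pvTbl ws) (10 * a + b) 0 = pvC ws a b := by
  induction ws with
  | nil =>
    intro a b ha1 ha2 hb1 hb2
    show PySem.List.pyGetD (List.replicate 100 (0:Int)) (10 * a + b) 0 = 0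
    exact pv_getD_rep _ (by omega)
  | cons w ws ih =>
    intro a b ha1 ha2 hb1 hb2
    rw [pv_tbl_cons, pv_bstep_get _ _ _ _ ha1 ha2 hb1 hb2]
    have hd1 := pvD_nonneg w a b
    have hd2 := pvD_lt w a b
    rw [ih a (pvD w a b) ha1 ha2 hd1 hd2, ih (pvD w a b) b hd1 hd2 hb1 hb2]
    rfl

-- B's scalar loop produces pvWs
theorem pv_wsfold (f : Int) (G : List Int) : ∀ (acc : List Int) (w m : Int),
    (G.foldl (fun (st : List Int × Int × Int) _ =>
        (st.1 ++ [st.2.1],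
         PySem.Int.mod (st.2.1 + st.2.2 * st.2.1 + f) 10,
         PySem.Int.mod (2 * st.2.2) 10)) (acc, w, m)).1
      = acc ++ pvWs f G.length w m := by
  induction G with
  | nil => intro acc w m; simp [pvWs]
  | cons x G ih =>
    intro acc w m
    simp only [List.foldl_cons, List.length_cons]
    rw [ih]
    show _ = acc ++ pvWs f (G.length + 1) w m
    simp [pvWs]

-- ===== VERDICT (by name: the statement is the Claim_ definition above) =====
theorem compute_weight_spec : Claim_equal_compute_weight := by
  intro colony generations _hdom hpre
  show compute_weight colony generations = compute_weight_alt colony generations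
  have hrange := pv_digits_range colony hpre
  have hA : compute_weight colony generations
      = PySem.Int.toStr (pvRun (PySem.List.pyRange 0 generations 1).length
          (pvDigits colony).sum (pvDigits colony)) := by
    simp only [compute_weight]
    rw [pv_zipfold]
    exact congrArg PySem.Int.toStr
      (pv_fold_run (PySem.List.pyRange 0 generations 1) (pvDigits colony).sum
        (pvDigits colony) hrange)
  rw [hA]
  -- B side
  have hm0 : (if 2 ≤ (pvDigits colony).length
        then PySem.Int.mod (((pvDigits colony).length : Int) - 1) 10 else 0)
      = PySem.Int.mod ((((pvDigits colony).zip (pvDigits colony).tail).length : Int)) 10 := by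
    rw [pv_zip_len]
    by_cases h : 2 ≤ (pvDigits colony).length
    · rw [if_pos h]
      have hc : (((pvDigits colony).length : Int) - 1)
          = (((pvDigits colony).length - 1 : Nat) : Int) := by
        have h1 : 1 ≤ (pvDigits colony).length := by omega
        push_cast [Nat.cast_sub h1]
        ring
      rw [hc]
    · rw [if_neg h]
      have hc : (pvDigits colony).length - 1 = 0 := by omega
      rw [hc]
      decide
  have hf : (if 2 ≤ (pvDigits colony).length
        then PySem.List.pyGetD (pvDigits colony) 0 0
          - PySem.List.pyGetD (pvDigits colony) (-1) 0 else 0)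
      = pvF (pvDigits colony) := by
    unfold pvF
    by_cases h : 2 ≤ (pvDigits colony).length
    · have hne : pvDigits colony ≠ [] := by
        intro hnil
        rw [hnil] at h
        simp at h
      rw [if_pos h, if_pos h, pv_neg_one _ hne, List.getLast?_eq_some_getLast hne]
      have h0 : PySem.List.pyGetD (pvDigits colony) 0 0 = (pvDigits colony).getD 0 0 := by
        rw [pv_pyGetD_toNat _ 0 (by omega)]
        rfl
      rw [h0]
      rfl
    · rw [if_neg h, if_neg h]
  simp only [compute_weight_alt]
  rw [hm0, hf]
  rw [pv_wsfold (pvF (pvDigits colony)) (PySem.List.pyRange 0 generations 1) []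
    (PySem.Int.mod (pvDigits colony).sum 10)
    (PySem.Int.mod ((((pvDigits colony).zip (pvDigits colony).tail).length : Int)) 10)]
  simp only [List.nil_append]
  -- the contribution-table lookups are pvC
  refine congrArg PySem.Int.toStr ?_
  have hmap : (((pvDigits colony).zip (pvDigits colony).tail).map
      (fun ab => PySem.List.pyGetD
        (pvTbl (pvWs (pvF (pvDigits colony)) (PySem.List.pyRange 0 generations 1).length
          (PySem.Int.mod (pvDigits colony).sum 10)
          (PySem.Int.mod ((((pvDigits colony).zip (pvDigits colony).tail).length : Int)) 10)))
        (10 * ab.1 + ab.2) 0))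
      = (((pvDigits colony).zip (pvDigits colony).tail).map
        (fun ab => pvC (pvWs (pvF (pvDigits colony)) (PySem.List.pyRange 0 generations 1).length
          (PySem.Int.mod (pvDigits colony).sum 10)
          (PySem.Int.mod ((((pvDigits colony).zip (pvDigits colony).tail).length : Int)) 10))
          ab.1 ab.2)) := by
    apply List.map_congr_left
    intro ab hab
    obtain ⟨h1, h2⟩ := List.of_mem_zip hab
    have h2' : ab.2 ∈ pvDigits colony := (pvDigits colony).tail_subset h2
    obtain ⟨ha1, ha2⟩ := hrange ab.1 h1
    obtain ⟨hb1, hb2⟩ := hrange ab.2 h2'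
    exact pv_tbl_C _ ab.1 ab.2 ha1 ha2 hb1 hb2
  show pvRun (PySem.List.pyRange 0 generations 1).length (pvDigits colony).sum (pvDigits colony)
    = (pvDigits colony).sum + (((pvDigits colony).zip (pvDigits colony).tail).map
        (fun ab => PySem.List.pyGetD
          (pvTbl (pvWs (pvF (pvDigits colony)) (PySem.List.pyRange 0 generations 1).length
            (PySem.Int.mod (pvDigits colony).sum 10)
            (PySem.Int.mod ((((pvDigits colony).zip (pvDigits colony).tail).length : Int)) 10)))
          (10 * ab.1 + ab.2) 0)).sum
  rw [hmap, ← pv_res_ws, ← pv_addSum_C, pv_run_addSum]
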